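-- pv_equiv track=rewrite | github.com/lee-cq/hugo-blog | p/main.py | countBalls_self
-- ===== SOURCE A (Python) =====
-- def countBalls_self(lowLimit, highLimit):
--     """
--     时间复杂度：O(N log n)
--     空间复杂度：O(N)
--     """
--     rest = dict()
--
--     def get_sum(n, s=0):
--         if n == 0:
--             return s
--         n, _s = divmod(n, 10)
--         return get_sum(n, s + _s)
--
--     for i in range(lowLimit, highLimit+1):
--         ss = get_sum(i)
--         if ss in rest:
--             rest[ss] += 1
--         else:
--             rest[ss] = 1
--
--     return max(rest.values())
-- ===== SOURCE B (Python) =====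
-- def countBalls_self(lowLimit, highLimit):
--     """Digit DP: count numbers per digit sum in [0, n] once per prefix level,
--     then take the max of the differences -- O(log(highLimit)) recursion depth
--     instead of iterating the whole range."""
--     MAXS = 100  # digit sums of numbers up to 2**31 are < 100
--
--     def digit_sum(n):
--         return 0 if n <= 0 else n % 10 + digit_sum(n // 10)
--
--     def counts_upto(n):
--         # cnt[s] = |{x in [0, n] : digit_sum(x) == s}| for s in range(MAXS)
--         if n < 0:
--             return [0] * MAXS
--         q, r = divmod(n, 10)
--         prev = counts_upto(q - 1)
--         sq = digit_sum(q)
--         return [sum(prev[s - d] for d in range(10) if s - d >= 0)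
--                 + (1 if sq <= s <= sq + r else 0)
--                 for s in range(MAXS)]
--
--     hi = counts_upto(highLimit)
--     lo = counts_upto(lowLimit - 1)
--     diffs = [hi[s] - lo[s] for s in range(MAXS)]
--     return max(d for d in diffs if d > 0)
-- ===== Notes on version B (the rewrite author's own statement) =====
-- stated objective: faster
-- what changed: replaces the per-number loop (digit-sum each of high-low+1 numbers into a counter dict, then max) with a digit DP that computes, in one recursion over the decimal prefixes, the count of numbers per digit sum in [0,n], and returns the max difference of the two prefix tables
import Mathlib
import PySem

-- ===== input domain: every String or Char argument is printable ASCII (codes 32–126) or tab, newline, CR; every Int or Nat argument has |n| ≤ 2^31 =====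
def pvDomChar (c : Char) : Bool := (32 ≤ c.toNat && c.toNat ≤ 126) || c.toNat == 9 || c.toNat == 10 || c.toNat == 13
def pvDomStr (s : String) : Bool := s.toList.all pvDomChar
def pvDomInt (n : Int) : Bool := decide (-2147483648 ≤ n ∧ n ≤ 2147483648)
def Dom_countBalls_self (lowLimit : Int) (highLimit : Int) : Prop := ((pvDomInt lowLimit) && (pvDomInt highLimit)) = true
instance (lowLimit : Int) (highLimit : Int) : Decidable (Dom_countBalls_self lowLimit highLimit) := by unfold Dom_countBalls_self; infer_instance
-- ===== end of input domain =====

-- B replaces A's per-number counting loop by a digit DP over decimal prefixes (one recursion per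
-- decimal digit instead of one step per number); equivalence is claimed on Pre_
-- (0 ≤ lowLimit ≤ highLimit), exactly the inputs on which A returns.

-- ===== PORT A =====
-- A's inner helper get_sum(n, s): recursion via divmod(n, 10). The fuel (always passed as
-- n.toNat + 1, enough for every n ≥ 0) only makes the recursion total; for n < 0 the Python
-- recursion never reaches 0 (RecursionError, outside Pre_) and the port returns s there.
def pvGetSum : Nat → Int → Int → Int
  | 0, _, s => s
  | fuel + 1, n, s =>
    if n = 0 then s
    else if n < 0 then s
    else pvGetSum fuel (PySem.Int.floordiv n 10) (s + PySem.Int.mod n 10)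

-- max(rest.values()) raises ValueError on an empty dict (lowLimit > highLimit, outside Pre_);
-- the port returns 0 there via .getD.
def countBalls_self (lowLimit : Int) (highLimit : Int) : Int :=
  let rest := (PySem.List.pyRange lowLimit (highLimit + 1)).foldl
    (fun rest i =>
      let ss := pvGetSum (i.toNat + 1) i 0
      if rest.contains ss then rest.insert ss (rest.getD ss 0 + 1)
      else rest.insert ss 1)
    PySem.Dict.empty
  (PySem.List.max? rest.values (fun v => v)).getD 0

-- ===== PORT B =====
-- digit_sum(n) = 0 if n <= 0 else n % 10 + digit_sum(n // 10); fuel n.toNat + 1 suffices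
def pvDigitSum : Nat → Int → Int
  | 0, _ => 0
  | fuel + 1, n =>
    if n ≤ 0 then 0
    else PySem.Int.mod n 10 + pvDigitSum fuel (PySem.Int.floordiv n 10)

-- counts_upto(n): table cnt[s] (s in range(100)) of |{x in [0,n] : digit_sum(x) == s}|;
-- fuel (n+1).toNat + 1 suffices (the recursion goes n -> n // 10 - 1)
def pvCountsUpto : Nat → Int → List Int
  | 0, _ => List.replicate 100 0
  | fuel + 1, n =>
    if n < 0 then List.replicate 100 0
    else
      let q := PySem.Int.floordiv n 10
      let r := PySem.Int.mod n 10
      let prev := pvCountsUpto fuel (q - 1)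
      let sq := pvDigitSum (q.toNat + 1) q
      (PySem.List.pyRange 0 100).map (fun s =>
        (((PySem.List.pyRange 0 10).filter (fun d => decide (0 ≤ s - d))).map
            (fun d => PySem.List.pyGetD prev (s - d) 0)).sum
          + (if sq ≤ s ∧ s ≤ sq + r then 1 else 0))

-- max(d for d in diffs if d > 0) raises ValueError when no digit sum occurs (empty range,
-- outside Pre_); the port returns 0 there via .getD.
def countBalls_self_alt (lowLimit : Int) (highLimit : Int) : Int :=
  let hi := pvCountsUpto ((highLimit + 1).toNat + 1) highLimit
  let lo := pvCountsUpto (lowLimit.toNat + 1) (lowLimit - 1)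
  let diffs := (PySem.List.pyRange 0 100).map
    (fun s => PySem.List.pyGetD hi s 0 - PySem.List.pyGetD lo s 0)
  (PySem.List.max? (diffs.filter (fun d => decide (0 < d))) (fun x => x)).getD 0

-- ===== PRECONDITION & SPEC =====
-- A raises outside Pre_: ValueError (max of empty dict) when lowLimit > highLimit,
-- RecursionError when the range contains a negative number (get_sum never reaches 0).
def Pre_countBalls_self (lowLimit : Int) (highLimit : Int) : Prop :=
  0 ≤ lowLimit ∧ lowLimit ≤ highLimit
instance (lowLimit : Int) (highLimit : Int) : Decidable (Pre_countBalls_self lowLimit highLimit) := by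
  unfold Pre_countBalls_self; infer_instance

def pvWitness_countBalls_self : Int × Int := (3, 17)

def Spec_countBalls_self (lowLimit : Int) (highLimit : Int) (out : Int) : Prop :=
  out = countBalls_self_alt lowLimit highLimit
instance (lowLimit : Int) (highLimit : Int) (out : Int) : Decidable (Spec_countBalls_self lowLimit highLimit out) := by
  unfold Spec_countBalls_self; infer_instance

-- ===== CLAIM (what is proved, stated in full; the proofs are below) =====
def Claim_equal_countBalls_self : Prop := ∀ (lowLimit : Int) (highLimit : Int), Dom_countBalls_self lowLimit highLimit → Pre_countBalls_self lowLimit highLimit → Spec_countBalls_self lowLimit highLimit (countBalls_self lowLimit highLimit)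

-- ===== LEMMAS AND PROOFS =====

-- the mathematical digit sum (proof-side reference)
def dsN (n : Nat) : Nat :=
  if n = 0 then 0 else n % 10 + dsN (n / 10)
decreasing_by exact Nat.div_lt_self (by omega) (by omega)

-- reference count of x ∈ [0, m) with digit sum s (s : Int so negative s counts nothing)
def cntI (m : Nat) (s : Int) : Int :=
  ((List.range m).countP (fun x => decide ((dsN x : Int) = s)) : Int)

lemma dsN_ten (q d : Nat) (hd : d < 10) : dsN (10 * q + d) = dsN q + d := by
  rw [dsN]
  by_cases h : 10 * q + d = 0
  · have hq : q = 0 := by omega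
    have hd0 : d = 0 := by omega
    subst hq hd0; simp [h, dsN]
  · have h1 : (10 * q + d) % 10 = d := by omega
    have h2 : (10 * q + d) / 10 = q := by omega
    rw [if_neg h, h1, h2]; omega

lemma dsN_bound (k : Nat) : ∀ x : Nat, x < 10 ^ k → dsN x ≤ 9 * k := by
  induction k with
  | zero => intro x hx; interval_cases x; simp [dsN]
  | succ k ih =>
    intro x hx
    rw [dsN]
    by_cases h : x = 0
    · simp [h]
    · rw [if_neg h]
      have h1 : x % 10 ≤ 9 := by omega
      have h2 : x / 10 < 10 ^ k := by
        have : (10:Nat) ^ (k+1) = 10 ^ k * 10 := by ring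
        omega
      have := ih (x / 10) h2
      omega

lemma pvGetSum_eq (n : Nat) : ∀ fuel : Nat, n < fuel → ∀ s : Int,
    pvGetSum fuel (n : Int) s = s + (dsN n : Int) := by
  induction n using Nat.strong_induction_on with
  | _ n ih =>
    intro fuel hf s
    obtain ⟨f, rfl⟩ : ∃ f, fuel = f + 1 := ⟨fuel - 1, by omega⟩
    rw [pvGetSum, dsN]
    by_cases h : n = 0
    · simp [h]
    · have hn0 : ¬((n : Int) = 0) := by exact_mod_cast h
      have hneg : ¬((n : Int) < 0) := by omega
      have hfd : PySem.Int.floordiv (n : Int) 10 = ((n / 10 : Nat) : Int) := by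
        exact_mod_cast PySem.Int.floordiv_natCast n 10
      have hmd : PySem.Int.mod (n : Int) 10 = ((n % 10 : Nat) : Int) := by
        exact_mod_cast PySem.Int.mod_natCast n 10
      have hlt : n / 10 < f := by
        have := Nat.div_lt_self (Nat.pos_of_ne_zero h) (by omega : 1 < 10); omega
      rw [if_neg hn0, if_neg hneg, if_neg h, hfd, hmd,
        ih (n / 10) (Nat.div_lt_self (by omega) (by omega)) f hlt]
      push_cast; ring

lemma pvDigitSum_eq (n : Nat) : ∀ fuel : Nat, n < fuel →
    pvDigitSum fuel (n : Int) = (dsN n : Int) := by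
  induction n using Nat.strong_induction_on with
  | _ n ih =>
    intro fuel hf
    obtain ⟨f, rfl⟩ : ∃ f, fuel = f + 1 := ⟨fuel - 1, by omega⟩
    rw [pvDigitSum, dsN]
    by_cases h : n = 0
    · simp [h]
    · have hn0 : ¬((n : Int) ≤ 0) := by
        have := Nat.pos_of_ne_zero h; omega
      have hfd : PySem.Int.floordiv (n : Int) 10 = ((n / 10 : Nat) : Int) := by
        exact_mod_cast PySem.Int.floordiv_natCast n 10
      have hmd : PySem.Int.mod (n : Int) 10 = ((n % 10 : Nat) : Int) := by
        exact_mod_cast PySem.Int.mod_natCast n 10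
      have hlt : n / 10 < f := by
        have := Nat.div_lt_self (Nat.pos_of_ne_zero h) (by omega : 1 < 10); omega
      rw [if_neg hn0, if_neg h, hfd, hmd,
        ih (n / 10) (Nat.div_lt_self (by omega) (by omega)) f hlt]
      push_cast; ring

-- splitting [0, 10Q) by last digit
lemma cntI_ten (Q : Nat) (s : Int) :
    cntI (10 * Q) s = ((List.range 10).map (fun d : Nat => cntI Q (s - d))).sum := by
  induction Q with
  | zero => simp [cntI]
  | succ Q ih =>
    have hsplit : (10 : Nat) * (Q + 1) = 10 * Q + 10 := by ring
    rw [hsplit]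
    unfold cntI
    rw [List.range_add, List.countP_append, List.countP_map]
    have hnew : ((List.range 10).countP
          ((fun x => decide ((dsN x : Int) = s)) ∘ (fun d => 10 * Q + d)))
        = (List.range 10).countP (fun d : Nat => decide ((dsN Q : Int) = s - (d : Int))) := by
      apply List.countP_congr
      intro d hd
      have hd10 : d < 10 := List.mem_range.mp hd
      simp only [Function.comp, dsN_ten Q d hd10, decide_eq_true_eq]
      constructor <;> · intro h; push_cast at *; omega
    rw [hnew]
    have hrhs : ∀ d : Nat, cntI (Q + 1) (s - d)
        = cntI Q (s - d)
          + (if decide ((dsN Q : Int) = s - (d : Int)) = true then 1 else 0) := by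
      intro d
      unfold cntI
      rw [List.range_succ, List.countP_append]
      simp only [List.countP_cons, List.countP_nil]
      split_ifs <;> push_cast <;> ring
    calc (((List.range (10 * Q)).countP (fun x => decide ((dsN x : Int) = s)) : Nat) : Int)
          + (((List.range 10).countP
              (fun d : Nat => decide ((dsN Q : Int) = s - (d : Int))) : Nat) : Int)
        = ((List.range 10).map (fun d : Nat => cntI Q (s - d))).sum
          + ((List.range 10).map
              (fun d : Nat =>
                if decide ((dsN Q : Int) = s - (d : Int)) = true then (1:Int) else 0)).sum := by
          rw [← ih, PySem.List.sum_map_ite_one_zero]; unfold cntI; ring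
      _ = ((List.range 10).map (fun d : Nat => cntI (Q + 1) (s - d))).sum := by
          rw [← List.sum_map_add]
          apply congrArg
          apply List.map_congr_left
          intro d _
          rw [hrhs d]

-- the last partial block [10Q, 10Q + R]
lemma cntI_block (Q R : Nat) (hR : R < 10) (s : Int) :
    cntI (10 * Q + R + 1) s
      = cntI (10 * Q) s + (if (dsN Q : Int) ≤ s ∧ s ≤ (dsN Q : Int) + R then 1 else 0) := by
  induction R with
  | zero =>
    unfold cntI
    rw [List.range_succ, List.countP_append]
    have h0 : dsN (10 * Q) = dsN Q := by
      have := dsN_ten Q 0 (by omega); simpa using this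
    simp only [List.countP_cons, List.countP_nil, h0]
    split_ifs with h1 h2 <;> simp only [decide_eq_true_eq] at * <;> push_cast at * <;> omega
  | succ R ih =>
    have hR' : R < 10 := by omega
    have hsplit : 10 * Q + (R + 1) + 1 = (10 * Q + R + 1) + 1 := by ring
    rw [hsplit]
    unfold cntI
    rw [List.range_succ, List.countP_append]
    have hds : dsN (10 * Q + R + 1) = dsN Q + (R + 1) := by
      have := dsN_ten Q (R + 1) (by omega)
      rw [← this]; ring_nf
    have := ih hR'
    unfold cntI at this
    simp only [List.countP_cons, List.countP_nil, hds]
    push_cast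
    rw [show (((List.range (10 * Q + R + 1)).countP
        (fun x => decide ((dsN x : Int) = s)) : Nat) : Int)
      = cntI (10 * Q + R + 1) s from rfl] at *
    split_ifs at * with h1 h2 h3 <;> simp only [decide_eq_true_eq] at * <;> omega

lemma cntI_nonpos (m : Nat) {s : Int} (hs : s < 0) : cntI m s = 0 := by
  unfold cntI
  norm_cast
  rw [List.countP_eq_zero]
  intro x _
  simp only [decide_eq_true_eq]
  have := Int.natCast_nonneg (dsN x)
  omega

lemma pvSumFilterMap (l : List Int) (p : Int → Bool) (g : Int → Int) :
    ((l.filter p).map g).sum = (l.map (fun d => if p d then g d else 0)).sum := by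
  induction l with
  | nil => simp
  | cons x t ih => by_cases h : p x <;> simp [h, ih]

-- main DP correctness: entry s of counts_upto(n) counts x ∈ [0, n] with digit sum s
lemma pvCountsUpto_eq : ∀ fuel : Nat, ∀ n : Int, (n + 1).toNat < fuel → ∀ s : Nat, s < 100 →
    PySem.List.pyGetD (pvCountsUpto fuel n) (s : Int) 0 = cntI (n + 1).toNat (s : Int) := by
  intro fuel
  induction fuel with
  | zero => intro n hf; exact absurd hf (Nat.not_lt_zero _)
  | succ f ih =>
    intro n hf s hs
    rw [pvCountsUpto]
    by_cases hn : n < 0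
    · rw [if_pos hn]
      have h0 : (n + 1).toNat = 0 := by omega
      rw [h0, PySem.List.pyGetD_of_nonneg _ _ (Int.natCast_nonneg s)]
      have hts : ((s : Int)).toNat = s := by omega
      rw [hts, List.getD_replicate _ hs]
      simp [cntI]
    · rw [if_neg hn]
      have hn0 : 0 ≤ n := by omega
      have hq : PySem.Int.floordiv n 10 = n / 10 :=
        PySem.Int.floordiv_eq_ediv_of_pos (by norm_num)
      have hr : PySem.Int.mod n 10 = n % 10 :=
        PySem.Int.mod_eq_emod_of_pos (by norm_num)
      have hq0 : 0 ≤ n / 10 := Int.ediv_nonneg hn0 (by norm_num)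
      have hr0 : 0 ≤ n % 10 := Int.emod_nonneg n (by norm_num)
      have hr9 : n % 10 < 10 := Int.emod_lt_of_pos n (by norm_num)
      have hQ : n / 10 = ((n / 10).toNat : Int) := (Int.toNat_of_nonneg hq0).symm
      have hR : n % 10 = ((n % 10).toNat : Int) := (Int.toNat_of_nonneg hr0).symm
      have hdm := Int.mul_ediv_add_emod n 10
      have hn1 : (n + 1).toNat = 10 * (n / 10).toNat + (n % 10).toNat + 1 := by omega
      have hR10 : (n % 10).toNat < 10 := by omega
      simp only [hq, hr]
      have hds : pvDigitSum ((n / 10).toNat + 1) (n / 10) = ((dsN (n / 10).toNat : Nat) : Int) := by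
        rw [hQ]; exact pvDigitSum_eq (n / 10).toNat ((n / 10).toNat + 1) (Nat.lt_succ_self _)
      rw [hds]
      have h100 : (100 : Int) = ((100 : Nat) : Int) := by norm_num
      rw [h100, PySem.List.pyGetD_map_pyRange _ 100 s _ hs]
      have hQf : ((n / 10 - 1) + 1).toNat < f := by omega
      have hsum : (((PySem.List.pyRange 0 10).filter (fun d => decide (0 ≤ (s : Int) - d))).map
            (fun d => PySem.List.pyGetD (pvCountsUpto f (n / 10 - 1)) ((s : Int) - d) 0)).sum
          = ((PySem.List.pyRange 0 10).map (fun d => cntI (n / 10).toNat ((s : Int) - d))).sum := by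
        rw [pvSumFilterMap]
        apply congrArg
        apply List.map_congr_left
        intro d hd
        have hd' : 0 ≤ d ∧ d < 10 := PySem.List.mem_pyRange_one.mp hd
        by_cases hpos : 0 ≤ (s : Int) - d
        · rw [if_pos (by simpa using hpos)]
          have ht : ((s : Int) - d).toNat < 100 := by omega
          have hcast : ((((s : Int) - d).toNat : Nat) : Int) = (s : Int) - d := by omega
          have := ih (n / 10 - 1) hQf (((s : Int) - d).toNat) ht
          rw [hcast] at this
          rw [this]
          have hQQ : (n / 10 - 1 + 1).toNat = (n / 10).toNat := by omega
          rw [hQQ]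
        · rw [if_neg (by simpa using hpos), cntI_nonpos _ (by omega)]
      rw [hsum]
      have hrange := PySem.List.pyRange_zero_natCast 10
      norm_num at hrange
      rw [hrange, List.map_map]
      simp only [Function.comp_def]
      rw [hn1, cntI_block _ _ hR10, ← cntI_ten]
      congr 1
      split_ifs with h1 h2 <;> first | rfl | (exfalso; omega)

-- A's dict loop is Counter(sums)
lemma foldA_eq_counter (xs : List Int) :
    xs.foldl
      (fun rest i =>
        let ss := pvGetSum (i.toNat + 1) i 0
        if rest.contains ss then rest.insert ss (rest.getD ss 0 + 1)
        else rest.insert ss 1)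
      PySem.Dict.empty
    = PySem.Dict.counter (xs.map (fun i => pvGetSum (i.toNat + 1) i 0)) := by
  rw [PySem.List.foldl_congr_mem xs _
    (fun rest i => rest.insert (pvGetSum (i.toNat + 1) i 0)
      (rest.getD (pvGetSum (i.toNat + 1) i 0) 0 + 1))
    PySem.Dict.empty ?_]
  · rw [← PySem.Dict.foldl_insert_getD_add_one_eq_counter, List.foldl_map]
  · intro acc i _
    simp only []
    by_cases h : acc.contains (pvGetSum (i.toNat + 1) i 0)
    · rw [if_pos h]
    · rw [if_neg h, PySem.Dict.getD_of_not_contains acc 0 (by simpa using h)]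
      norm_num

-- counting over a Python range is a difference of prefix counts
lemma countP_pyRange (a : Int) (ha : 0 ≤ a) (P : Int → Bool) :
    ∀ k : Nat, ((List.range (a + k).toNat).countP (fun x : Nat => P (x : Int)) : Int)
      = ((List.range a.toNat).countP (fun x : Nat => P (x : Int)) : Int)
        + ((PySem.List.pyRange a (a + k)).countP P : Int) := by
  intro k
  induction k with
  | zero =>
    have hnil : (PySem.List.pyRange a (a + (0 : Nat))).countP P = 0 := by
      rw [List.countP_eq_zero]
      intro x hx
      have := PySem.List.mem_pyRange_one.mp hx
      omega
    rw [hnil]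
    simp
  | succ k ih =>
    have hstep : a + (k + 1 : Nat) = (a + k) + 1 := by push_cast; ring
    rw [hstep, PySem.List.pyRange_one_succ_right (by omega : a ≤ a + (k : Int)),
      List.countP_append]
    have htn : ((a + k) + 1).toNat = (a + (k : Int)).toNat + 1 := by omega
    rw [htn, List.range_succ, List.countP_append]
    simp only [List.countP_cons, List.countP_nil]
    have hcast : ((a + (k : Int)).toNat : Int) = a + k := by omega
    have hP : P (((a + (k : Int)).toNat : Nat) : Int) = P (a + k) := by rw [hcast]
    push_cast
    rw [hP, ih]
    ring

-- ===== VERDICT (by name: the statement is the Claim_ definition above) =====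
theorem countBalls_self_spec : Claim_equal_countBalls_self := by
  intro lo hi hdom hpre
  obtain ⟨hlo0, hlohi⟩ := hpre
  unfold Dom_countBalls_self pvDomInt at hdom
  simp only [Bool.and_eq_true, decide_eq_true_eq] at hdom
  obtain ⟨⟨-, hloB⟩, -, hhiB⟩ := hdom
  unfold Spec_countBalls_self countBalls_self countBalls_self_alt
  simp only [foldA_eq_counter]
  set key : Int → Int := fun i => pvGetSum (i.toNat + 1) i 0 with hkey
  set xs : List Int := PySem.List.pyRange lo (hi + 1) with hxs
  set sums : List Int := xs.map key with hsums
  -- every digit sum arising from xs is dsN and is < 100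
  have hmemxs : ∀ i ∈ xs, 0 ≤ i ∧ i ≤ hi := by
    intro i hi'
    have := PySem.List.mem_pyRange_one.mp hi'
    omega
  have hkey_eq : ∀ i ∈ xs, key i = ((dsN i.toNat : Nat) : Int) := by
    intro i hi'
    have h0 : 0 ≤ i := (hmemxs i hi').1
    have hc : ((i.toNat : Nat) : Int) = i := by omega
    rw [hkey]
    calc pvGetSum (i.toNat + 1) i 0
        = pvGetSum (i.toNat + 1) ((i.toNat : Nat) : Int) 0 := by rw [hc]
      _ = 0 + ((dsN i.toNat : Nat) : Int) :=
          pvGetSum_eq i.toNat (i.toNat + 1) (Nat.lt_succ_self _) 0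
      _ = ((dsN i.toNat : Nat) : Int) := by ring
  have hds_lt : ∀ i ∈ xs, dsN i.toNat < 100 := by
    intro i hi'
    have h1 : i.toNat < 10 ^ 10 := by
      have := (hmemxs i hi').2
      have : i ≤ 2147483648 := by omega
      omega
    have := dsN_bound 10 i.toNat h1
    omega
  -- the per-digit-sum count over xs, as an Int
  set P : Nat → Int → Bool := fun sN i => decide ((dsN i.toNat : Int) = (sN : Int)) with hP
  -- B's table entries are exactly those counts
  have hdiff : ∀ sN : Nat, sN < 100 →
      PySem.List.pyGetD (pvCountsUpto ((hi + 1).toNat + 1) hi) ((sN : Nat) : Int) 0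
        - PySem.List.pyGetD (pvCountsUpto (lo.toNat + 1) (lo - 1)) ((sN : Nat) : Int) 0
      = (xs.countP (P sN) : Int) := by
    intro sN hsN
    rw [pvCountsUpto_eq ((hi + 1).toNat + 1) hi (Nat.lt_succ_self _) sN hsN,
      pvCountsUpto_eq (lo.toNat + 1) (lo - 1) (by omega) sN hsN]
    have hrw := countP_pyRange lo hlo0 (P sN) (hi + 1 - lo).toNat
    have hak : lo + ((hi + 1 - lo).toNat : Int) = hi + 1 := by omega
    rw [hak] at hrw
    have hcnt1 : cntI (hi + 1).toNat ((sN : Nat) : Int)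
        = ((List.range (hi + 1).toNat).countP (fun x : Nat => P sN (x : Int)) : Int) := by
      unfold cntI
      congr 1
    have hcnt2 : cntI (lo - 1 + 1).toNat ((sN : Nat) : Int)
        = ((List.range lo.toNat).countP (fun x : Nat => P sN (x : Int)) : Int) := by
      have hln : (lo - 1 + 1).toNat = lo.toNat := by omega
      rw [hln]
      unfold cntI
      congr 1
    rw [hcnt1, hcnt2, hxs]
    omega
  -- counts in the multiset of sums are counts over xs
  have hcount : ∀ sN : Nat, (sums.count ((sN : Nat) : Int) : Int) = (xs.countP (P sN) : Int) := by
    intro sN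
    rw [hsums, List.count_eq_countP, List.countP_map]
    congr 1
    apply List.countP_congr
    intro i hi'
    simp only [Function.comp, hkey_eq i hi', hP, beq_iff_eq, decide_eq_true_eq]
  -- A's values list
  have hnodup := PySem.Dict.nodup_keys_counter (xs := sums)
  have hvals : (PySem.Dict.counter sums).values
      = (PySem.Set.ofList sums).map (fun k => ((sums.count k : Nat) : Int)) := by
    show ((PySem.Dict.counter sums).items).map (·.2) = _
    rw [PySem.Dict.items_counter, List.map_map]
    rfl
  -- nonemptiness
  have hloxs : lo ∈ xs := by rw [hxs]; exact PySem.List.mem_pyRange_one.mpr (by omega)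
  have hsums_ne : sums ≠ [] := by
    rw [hsums]
    simp only [ne_eq, List.map_eq_nil_iff]
    intro h
    rw [h] at hloxs
    exact absurd hloxs (List.not_mem_nil)
  set dHi := pvCountsUpto ((hi + 1).toNat + 1) hi with hdHi
  set dLo := pvCountsUpto (lo.toNat + 1) (lo - 1) with hdLo
  set L : List Int := (PySem.List.pyRange 0 100).map
      (fun s => PySem.List.pyGetD dHi s 0 - PySem.List.pyGetD dLo s 0) with hL
  set F : List Int := L.filter (fun d => decide (0 < d)) with hF
  -- every entry of B's candidate list is a per-digit-sum count, and conversely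
  have hLmem : ∀ w ∈ L, ∃ sN : Nat, sN < 100 ∧ w = (xs.countP (P sN) : Int) := by
    intro w hw
    rw [hL] at hw
    obtain ⟨t, ht, hwt⟩ := List.mem_map.mp hw
    have htb := PySem.List.mem_pyRange_one.mp ht
    refine ⟨t.toNat, by omega, ?_⟩
    have hc : ((t.toNat : Nat) : Int) = t := by omega
    rw [← hwt, ← hc, hdiff t.toNat (by omega)]
    simp only [Int.toNat_natCast]
  have hLmem' : ∀ sN : Nat, sN < 100 → (xs.countP (P sN) : Int) ∈ L := by
    intro sN hsN
    rw [hL]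
    refine List.mem_map.mpr ⟨((sN : Nat) : Int), ?_, hdiff sN hsN⟩
    exact PySem.List.mem_pyRange_one.mpr (by omega)
  -- every value of A's counter is a per-digit-sum count ≥ 1, and conversely
  have hVmem : ∀ v ∈ (PySem.Dict.counter sums).values,
      ∃ sN : Nat, sN < 100 ∧ v = (xs.countP (P sN) : Int) ∧ 1 ≤ v := by
    intro v hv
    rw [hvals] at hv
    obtain ⟨k, hk, hvk⟩ := List.mem_map.mp hv
    have hks : k ∈ sums := (PySem.Set.mem_ofList sums k).mp hk
    obtain ⟨i, hixs, hik⟩ := List.mem_map.mp hks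
    refine ⟨dsN i.toNat, hds_lt i hixs, ?_, ?_⟩
    · rw [← hvk, ← hik, hkey_eq i hixs, hcount]
    · rw [← hvk]
      have : 0 < sums.count k := List.count_pos_iff.mpr hks
      omega
  have hVmem' : ∀ sN : Nat, sN < 100 → 0 < xs.countP (P sN) →
      (xs.countP (P sN) : Int) ∈ (PySem.Dict.counter sums).values := by
    intro sN hsN hpos
    obtain ⟨i, hixs, hPi⟩ := List.countP_pos_iff.mp hpos
    have hiN : dsN i.toNat = sN := by
      rw [hP] at hPi
      simp only [decide_eq_true_eq] at hPi
      exact_mod_cast hPi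
    have hmem : ((sN : Nat) : Int) ∈ sums := by
      rw [hsums]
      refine List.mem_map.mpr ⟨i, hixs, ?_⟩
      rw [hkey_eq i hixs, hiN]
    rw [hvals, ← hcount sN]
    exact List.mem_map.mpr ⟨((sN : Nat) : Int), (PySem.Set.mem_ofList sums _).mpr hmem, rfl⟩
  -- both maxima exist
  have hvne : (PySem.Dict.counter sums).values ≠ [] := by
    rw [hvals]
    simp only [ne_eq, List.map_eq_nil_iff]
    intro h
    obtain ⟨x, hx⟩ := List.exists_mem_of_ne_nil sums hsums_ne
    have := (PySem.Set.mem_ofList sums x).mpr hx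
    rw [h] at this
    exact absurd this (List.not_mem_nil)
  obtain ⟨m, hm⟩ : ∃ m, PySem.List.max? (PySem.Dict.counter sums).values (fun v => v) = some m := by
    cases hmx : PySem.List.max? (PySem.Dict.counter sums).values (fun v => v) with
    | none => exact absurd ((PySem.List.max?_eq_none_iff _ _).mp hmx) hvne
    | some m => exact ⟨m, rfl⟩
  obtain ⟨sm, hsm, hmeq, hm1⟩ := hVmem m (PySem.List.max?_mem hm)
  have hmF : m ∈ F := by
    rw [hF]
    refine List.mem_filter.mpr ⟨?_, by simp only [decide_eq_true_eq]; omega⟩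
    rw [hmeq]
    exact hLmem' sm hsm
  obtain ⟨M, hM⟩ : ∃ M, PySem.List.max? F (fun x => x) = some M := by
    cases hmx : PySem.List.max? F (fun x => x) with
    | none =>
      have := (PySem.List.max?_eq_none_iff _ _).mp hmx
      rw [this] at hmF
      exact absurd hmF (List.not_mem_nil)
    | some M => exact ⟨M, rfl⟩
  rw [hm, hM, Option.getD_some, Option.getD_some]
  -- m ≤ M and M ≤ m
  have hmM : m ≤ M := PySem.List.max?_isMax hM _ hmF
  have hMm : M ≤ m := by
    have hMF := PySem.List.max?_mem hM
    rw [hF] at hMF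
    obtain ⟨hML, hMpos⟩ := List.mem_filter.mp hMF
    obtain ⟨sM, hsM, hMeq⟩ := hLmem M hML
    have hpos : 0 < xs.countP (P sM) := by
      simp only [decide_eq_true_eq] at hMpos
      omega
    have := PySem.List.max?_isMax hm _ (hVmem' sM hsM hpos)
    rw [← hMeq] at this
    exact this
  omega
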